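-- pv_equiv track=rewrite | github.com/MrKenKaneki20/animebot | bot.py | make_hint
-- ===== SOURCE A (Python) =====
-- def make_hint(name: str):
--     result = []
--     new_word = True
--     for ch in name:
--         if ch == " ":
--             result.append("  ")
--             new_word = True
--         elif ch.isalpha():
--             if new_word:
--                 result.append(ch.upper() + " ")
--                 new_word = False
--             else:
--                 result.append("_ ")
--         else:
--             result.append(ch + " ")
--     return "".join(result).strip()
-- ===== SOURCE B (Python) =====
-- def make_hint(name: str):
--     cells = []
--     for i, seg in enumerate(name.split(' ')):
--         if i > 0:
--             cells.append(' ')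
--         revealed = False
--         for ch in seg:
--             if ch.isalpha():
--                 cells.append('_' if revealed else ch.upper())
--                 revealed = True
--             else:
--                 cells.append(ch)
--     return ' '.join(cells).strip()
-- ===== Notes on version B (the rewrite author's own statement) =====
-- stated objective: idiomatic
-- what changed: B splits the name on single spaces and runs a per-segment loop with a local revealed flag emitting one-char cells (plus a separator cell before every segment after the first), then joins the cells with a space and strips, instead of A's single character loop with a persistent new-word flag building two-char tokens.
import Mathlib
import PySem

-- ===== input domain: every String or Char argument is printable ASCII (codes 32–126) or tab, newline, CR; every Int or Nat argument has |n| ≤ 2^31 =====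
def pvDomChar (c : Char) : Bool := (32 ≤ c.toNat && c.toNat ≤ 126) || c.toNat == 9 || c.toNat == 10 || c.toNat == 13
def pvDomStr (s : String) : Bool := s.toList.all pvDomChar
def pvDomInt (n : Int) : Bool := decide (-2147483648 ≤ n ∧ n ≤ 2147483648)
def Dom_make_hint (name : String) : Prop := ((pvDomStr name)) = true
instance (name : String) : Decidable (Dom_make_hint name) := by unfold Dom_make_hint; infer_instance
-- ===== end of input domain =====

-- B restructures A's single char loop with a persistent new_word flag into split(' ') +
-- a per-segment loop with a local revealed flag, joining one-char cells with ' ' (objective: idiomatic).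

-- ===== PORT A =====
-- the for loop over the chars of name, carrying new_word; each appended string is one token
def aTok : List Char → Bool → List (List Char)
  | [], _ => []
  | c :: cs, nw =>
    if c = ' ' then [' ', ' '] :: aTok cs true
    else if PySem.Chars.isalpha c then
      if nw then [PySem.Chars.upperChar c, ' '] :: aTok cs false
      else ['_', ' '] :: aTok cs false
    else [c, ' '] :: aTok cs nw

def make_hint (name : String) : String :=
  String.ofList (PySem.Chars.strip (PySem.Chars.join [] (aTok name.toList true)))

-- ===== PORT B =====
-- hand port of Python's name.split(' ') (single-space separator, keeps empty pieces);
-- exact: '' → [''], a leading/trailing/double space yields an empty piece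
def splitSp : List Char → List (List Char)
  | [] => [[]]
  | c :: cs =>
    if c = ' ' then [] :: splitSp cs
    else match splitSp cs with
      | [] => [[c]]          -- unreachable: splitSp never returns []
      | s :: rest => (c :: s) :: rest

-- the inner loop of B: cells of one segment, carrying the local revealed flag
def segCells : Bool → List Char → List (List Char)
  | _, [] => []
  | rev, c :: cs =>
    if PySem.Chars.isalpha c then
      (if rev then ['_'] else [PySem.Chars.upperChar c]) :: segCells true cs
    else [c] :: segCells rev cs

-- the outer loop of B over enumerate(segments): a ' ' cell before every segment after the first
def bCells : Nat → List (List Char) → List (List Char)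
  | _, [] => []
  | i, s :: rest => (if 0 < i then [[' ']] else []) ++ (segCells false s ++ bCells (i + 1) rest)

def make_hint_alt (name : String) : String :=
  String.ofList (PySem.Chars.strip (PySem.Chars.join [' '] (bCells 0 (splitSp name.toList))))

-- ===== PRECONDITION & SPEC =====
def Spec_make_hint (name : String) (out : String) : Prop := out = make_hint_alt name
instance (name : String) (out : String) : Decidable (Spec_make_hint name out) := by unfold Spec_make_hint; infer_instance

-- ===== CLAIM (what is proved, stated in full; the proofs are below) =====
def Claim_equal_make_hint : Prop := ∀ (name : String), Dom_make_hint name → Spec_make_hint name (make_hint name)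

-- ===== LEMMAS AND PROOFS =====

-- A's tokens as one-char cells (proof helper): A's token for a char is always cell ++ [' ']
def cellsAll : List Char → Bool → List (List Char)
  | [], _ => []
  | c :: cs, nw =>
    if c = ' ' then [' '] :: cellsAll cs true
    else if PySem.Chars.isalpha c then
      (if nw then [PySem.Chars.upperChar c] else ['_']) :: cellsAll cs false
    else [c] :: cellsAll cs nw

lemma aTok_eq_map_cellsAll (cs : List Char) (nw : Bool) :
    aTok cs nw = (cellsAll cs nw).map (· ++ [' ']) := by
  induction cs generalizing nw with
  | nil => simp [aTok, cellsAll]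
  | cons c cs ih =>
    simp only [aTok, cellsAll]
    split_ifs <;> simp [ih]

lemma splitSp_ne_nil (cs : List Char) : splitSp cs ≠ [] := by
  cases cs with
  | nil => simp [splitSp]
  | cons c cs =>
    simp only [splitSp]
    split_ifs
    · simp
    · cases h : splitSp cs <;> simp

lemma bCells_succ (segs : List (List Char)) (i : Nat) :
    bCells (i + 1) segs = segs.flatMap (fun t => [' '] :: segCells false t) := by
  induction segs generalizing i with
  | nil => simp [bCells]
  | cons s rest ih => simp [bCells, ih]

-- A's cell stream equals B's: first segment keyed by the incoming new_word flag, the rest fresh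
lemma cellsAll_eq_split (cs : List Char) (nw : Bool) :
    cellsAll cs nw =
      (match splitSp cs with
       | [] => []
       | s :: rest => segCells (!nw) s ++ rest.flatMap (fun t => [' '] :: segCells false t)) := by
  induction cs generalizing nw with
  | nil => simp [cellsAll, splitSp, segCells]
  | cons c cs ih =>
    by_cases hsp : c = ' '
    · subst hsp
      simp only [cellsAll, splitSp]
      obtain ⟨s, rest, hs⟩ : ∃ s rest, splitSp cs = s :: rest := by
        cases h : splitSp cs with
        | nil => exact absurd h (splitSp_ne_nil cs)
        | cons s rest => exact ⟨s, rest, rfl⟩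
      rw [ih true, hs]
      simp [segCells]
    · obtain ⟨s, rest, hs⟩ : ∃ s rest, splitSp cs = s :: rest := by
        cases h : splitSp cs with
        | nil => exact absurd h (splitSp_ne_nil cs)
        | cons s rest => exact ⟨s, rest, rfl⟩
      simp only [cellsAll, splitSp, if_neg hsp, hs]
      by_cases ha : PySem.Chars.isalpha c = true
      · rw [ih false, hs]
        cases nw <;> simp [segCells, ha]
      · rw [ih nw, hs]
        cases nw <;> simp [segCells, ha]

-- "".join of (cell + " ") tokens is " ".join of the cells plus one trailing space
lemma join_nil_map_space (xs : List (List Char)) (hne : xs ≠ []) :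
    PySem.Chars.join [] (xs.map (· ++ [' '])) = PySem.Chars.join [' '] xs ++ [' '] := by
  induction xs with
  | nil => exact absurd rfl hne
  | cons a xs ih =>
    cases xs with
    | nil => simp [PySem.Chars.join_singleton]
    | cons b rest =>
      simp only [List.map_cons] at ih ⊢
      rw [PySem.Chars.join_cons_cons, PySem.Chars.join_cons_cons, ih (by simp)]
      simp

lemma rstrip_append_space (zs : List Char) :
    PySem.Chars.rstrip (zs ++ [' ']) = PySem.Chars.rstrip zs := by
  simp [PySem.Chars.rstrip, PySem.Chars.isspace]

lemma strip_append_space (ys : List Char) :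
    PySem.Chars.strip (ys ++ [' ']) = PySem.Chars.strip ys := by
  simp only [PySem.Chars.strip, PySem.Chars.lstrip, List.dropWhile_append]
  split_ifs with h
  · simp only [List.isEmpty_iff] at h
    simp [h, PySem.Chars.rstrip, PySem.Chars.isspace]
  · exact rstrip_append_space _

-- ===== VERDICT (by name: the statement is the Claim_ definition above) =====
theorem make_hint_spec : Claim_equal_make_hint := by
  intro name _
  unfold Spec_make_hint make_hint make_hint_alt
  obtain ⟨s, rest, hs⟩ : ∃ s rest, splitSp name.toList = s :: rest := by
    cases h : splitSp name.toList with
    | nil => exact absurd h (splitSp_ne_nil _)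
    | cons s rest => exact ⟨s, rest, rfl⟩
  have hca : cellsAll name.toList true =
      segCells false s ++ rest.flatMap (fun t => [' '] :: segCells false t) := by
    rw [cellsAll_eq_split, hs]
    rfl
  have hb : bCells 0 (s :: rest) =
      segCells false s ++ rest.flatMap (fun t => [' '] :: segCells false t) := by
    simp [bCells, bCells_succ]
  rw [aTok_eq_map_cellsAll, hca, hs, hb]
  rcases eq_or_ne (segCells false s ++ rest.flatMap (fun t => [' '] :: segCells false t)) [] with hne | hne
  · rw [hne]
    simp [PySem.Chars.join_nil]
  · rw [join_nil_map_space _ hne, strip_append_space]
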